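-- pv_equiv track=rewrite | github.com/Graywing13/uniFirstYearFrolicking | one/add_comp.py | add_comp
-- ===== SOURCE A (Python) =====
-- def add_comp(num):
--     if num <= 3:
--         return 0
--     else:
--         comp_num_sum = 0
--         for n in range(3, num+1):
--             for m in range(2, n):
--                 if (n % m) == 0:
--                     comp_num_sum += n
--                     break
--     return comp_num_sum
-- ===== SOURCE B (Python) =====
-- def add_comp(num):
--     if num <= 3:
--         return 0
--     prime_sum = 0
--     for n in range(3, num + 1):
--         if _is_prime(n):
--             prime_sum += n
--     return num * (num + 1) // 2 - 3 - prime_sum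
--
--
-- def _is_prime(n):
--     m = 2
--     while m * m <= n:
--         if n % m == 0:
--             return False
--         m += 1
--     return True
-- ===== Notes on version B (the rewrite author's own statement) =====
-- stated objective: faster
-- what changed: B computes the closed-form sum of 3..num and subtracts the primes, tested by trial division only up to sqrt(n), instead of A's inner scan of all divisors up to n for each n.
import Mathlib
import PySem

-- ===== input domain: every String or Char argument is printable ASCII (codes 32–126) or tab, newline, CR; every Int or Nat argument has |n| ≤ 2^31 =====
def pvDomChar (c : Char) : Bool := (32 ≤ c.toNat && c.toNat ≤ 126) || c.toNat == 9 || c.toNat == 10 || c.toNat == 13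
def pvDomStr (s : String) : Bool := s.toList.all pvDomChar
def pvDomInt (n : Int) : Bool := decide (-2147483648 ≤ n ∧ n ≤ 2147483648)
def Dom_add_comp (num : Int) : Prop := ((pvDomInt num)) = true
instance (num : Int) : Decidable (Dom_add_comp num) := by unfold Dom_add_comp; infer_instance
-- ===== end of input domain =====

-- B computes the closed-form sum of 3..num and subtracts the primes (trial division up
-- to sqrt n) instead of A's full divisor scan for each n; objective: faster.

-- ===== PORT A =====
-- inner 'for m in range(2, n): if n % m == 0: add & break' adds n iff some m in the range divides n
def add_comp (num : Int) : Int :=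
  if num ≤ 3 then 0
  else
    (PySem.List.pyRange 3 (num + 1) 1).foldl
      (fun acc n =>
        if (PySem.List.pyRange 2 n 1).any (fun m => PySem.Int.mod n m == 0) then acc + n
        else acc) 0

-- ===== PORT B =====
-- the 'while m * m <= n' loop of _is_prime
def isPrimeB (n m : Int) : Bool :=
  if _h : m * m ≤ n then
    if PySem.Int.mod n m == 0 then false else isPrimeB n (m + 1)
  else true
termination_by (n + 1 - m).toNat
decreasing_by
  have hm : m ≤ n := by
    by_cases h0 : m ≤ 0
    · linarith [mul_self_nonneg m]
    · have h1 : m * 1 ≤ m * m := mul_le_mul_of_nonneg_left (by omega) (by omega)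
      linarith
  omega

def add_comp_alt (num : Int) : Int :=
  if num ≤ 3 then 0
  else
    let primeSum :=
      (PySem.List.pyRange 3 (num + 1) 1).foldl
        (fun acc n => if isPrimeB n 2 then acc + n else acc) 0
    PySem.Int.floordiv (num * (num + 1)) 2 - 3 - primeSum

-- ===== PRECONDITION & SPEC =====
def Spec_add_comp (num : Int) (out : Int) : Prop := out = add_comp_alt num
instance (num : Int) (out : Int) : Decidable (Spec_add_comp num out) := by unfold Spec_add_comp; infer_instance

-- ===== CLAIM (what is proved, stated in full; the proofs are below) =====
def Claim_equal_add_comp : Prop := ∀ (num : Int), Dom_add_comp num → Spec_add_comp num (add_comp num)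

-- ===== LEMMAS AND PROOFS =====

theorem isPrimeB_true_iff (n m : Int) :
    0 ≤ m → (isPrimeB n m = true ↔ ∀ d, m ≤ d → d * d ≤ n → PySem.Int.mod n d ≠ 0) := by
  fun_induction isPrimeB n m with
  | case1 m h hmod =>
    intro _
    simp only [Bool.false_eq_true, false_iff]
    push Not
    exact ⟨m, le_rfl, h, by simpa using hmod⟩
  | case2 m h hmod ih =>
    intro hm0
    rw [ih (by omega)]
    constructor
    · intro H d hd hdd
      rcases eq_or_lt_of_le hd with rfl | hlt
      · simpa using hmod
      · exact H d (by omega) hdd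
    · intro H d hd hdd
      exact H d (by omega) hdd
  | case3 m h =>
    intro hm0
    simp only [true_iff]
    intro d hd hdd
    exfalso
    exact h (le_trans (mul_self_le_mul_self hm0 hd) hdd)

-- pointwise: A's inner scan finds a divisor iff B's sqrt-bounded test reports composite
theorem any_div_eq (n : Int) (_hn : 2 ≤ n) :
    (PySem.List.pyRange 2 n 1).any (fun m => PySem.Int.mod n m == 0) = !isPrimeB n 2 := by
  have hiff := isPrimeB_true_iff n 2 (by omega)
  cases hp : isPrimeB n 2 with
  | true =>
    simp only [Bool.not_true, List.any_eq_false]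
    intro m hmem
    obtain ⟨hm2, hmn⟩ := (PySem.List.mem_pyRange_one).mp hmem
    simp only [beq_iff_eq]
    intro hmod
    have hdvd : m ∣ n := (PySem.Int.mod_eq_zero_iff_dvd n m).mp hmod
    obtain ⟨k, hk⟩ := hdvd
    have hk2 : 2 ≤ k := by
      by_contra hklt
      push Not at hklt
      have hmk : m * k ≤ m * 1 := mul_le_mul_of_nonneg_left (by omega) (by omega)
      linarith
    have hd2 : 2 ≤ min m k := le_min hm2 hk2
    have hdd : min m k * min m k ≤ n := by
      calc min m k * min m k ≤ m * k :=
            mul_le_mul (min_le_left m k) (min_le_right m k) (by omega) (by omega)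
        _ = n := hk.symm
    have hddvd : min m k ∣ n := by
      rcases min_choice m k with hmin | hmin
      · rw [hmin]; exact ⟨k, hk⟩
      · rw [hmin]; exact ⟨m, by linarith [hk, mul_comm m k]⟩
    exact hiff.mp hp (min m k) hd2 hdd ((PySem.Int.mod_eq_zero_iff_dvd n (min m k)).mpr hddvd)
  | false =>
    simp only [Bool.not_false, List.any_eq_true]
    have hnot : ¬ ∀ d, 2 ≤ d → d * d ≤ n → PySem.Int.mod n d ≠ 0 := by
      intro H
      rw [hiff.mpr H] at hp
      exact Bool.true_eq_false.mp hp
    push Not at hnot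
    obtain ⟨d, hd2, hdd, hmod⟩ := hnot
    have hdn : d < n := by nlinarith
    exact ⟨d, (PySem.List.mem_pyRange_one).mpr ⟨hd2, hdn⟩, by simpa using hmod⟩

theorem sum_rel (num : Int) (h : 3 ≤ num) :
    (PySem.List.pyRange 3 (num + 1) 1).foldl
      (fun acc n =>
        if (PySem.List.pyRange 2 n 1).any (fun m => PySem.Int.mod n m == 0) then acc + n
        else acc) 0
    = PySem.Int.floordiv (num * (num + 1)) 2 - 3 -
      (PySem.List.pyRange 3 (num + 1) 1).foldl
        (fun acc n => if isPrimeB n 2 then acc + n else acc) 0 := by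
  induction num, h using Int.le_induction with
  | base =>
    have e1 : isPrimeB 3 2 = true := by rw [isPrimeB]; norm_num
    have e2 : PySem.Int.floordiv (3 * (3 + 1)) 2 = 6 := by
      rw [PySem.Int.floordiv_eq_ediv_of_pos (by omega)]; norm_num
    norm_num [PySem.List.pyRange_one, List.range_succ, PySem.Int.mod, e1, e2]
    decide
  | succ n _hn ih =>
    have hsplit : PySem.List.pyRange 3 (n + 1 + 1) 1
        = PySem.List.pyRange 3 (n + 1) 1 ++ [n + 1] :=
      PySem.List.pyRange_one_succ_right (by omega)
    have key : PySem.Int.floordiv ((n + 1) * (n + 1 + 1)) 2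
        = PySem.Int.floordiv (n * (n + 1)) 2 + (n + 1) := by
      rw [PySem.Int.floordiv_eq_ediv_of_pos (by omega),
          PySem.Int.floordiv_eq_ediv_of_pos (by omega)]
      have hrw : (n + 1) * (n + 1 + 1) = n * (n + 1) + (n + 1) * 2 := by ring
      rw [hrw, Int.add_mul_ediv_right _ _ (by omega : (2:Int) ≠ 0)]
    rw [hsplit]
    simp only [List.foldl_append, List.foldl_cons, List.foldl_nil]
    rw [any_div_eq (n + 1) (by omega), key, ih]
    cases isPrimeB (n + 1) 2 <;> simp only [Bool.not_false, Bool.not_true, if_true, if_false, Bool.false_eq_true] <;> ring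

-- ===== VERDICT (by name: the statement is the Claim_ definition above) =====
theorem add_comp_spec : Claim_equal_add_comp := by
  intro num _
  unfold Spec_add_comp add_comp add_comp_alt
  by_cases h : num ≤ 3
  · simp [h]
  · simp only [h, if_false]
    exact sum_rel num (by omega)
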